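-- pv_equiv track=rewrite | github.com/Emmanuel700-spec/Coderbyte-revisions-quizzes | missing-vowels.py | missing_vowels
-- ===== SOURCE A (Python) =====
-- def missing_vowels(s: str) -> str:
--     vowels = {'a', 'e', 'i', 'o', 'u'}
--     found_vowels = set()
--
--     # Iterate through the string and add vowels to found_vowels set
--     for char in s:
--         if char in vowels:
--             found_vowels.add(char)
--
--     # Determine the missing vowels by subtracting found_vowels from vowels
--     missing = vowels - found_vowels
--
--     # Return the missing vowels as a sorted string
--     return ''.join(sorted(missing)) if missing else 'None'
-- ===== SOURCE B (Python) =====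
-- def missing_vowels(s: str) -> str:
--     res = ''.join(v for v in 'aeiou' if v not in s)
--     return res if res else 'None'
-- ===== Notes on version B (the rewrite author's own statement) =====
-- stated objective: idiomatic
-- what changed: Instead of scanning all of s to accumulate a found-vowels set, then taking a set difference and sorting it, B probes s once per vowel of the already-ordered vowel literal and joins the absent ones directly (no set built, no difference, no sort); each probe short-circuits at the first occurrence.
import Mathlib
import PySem

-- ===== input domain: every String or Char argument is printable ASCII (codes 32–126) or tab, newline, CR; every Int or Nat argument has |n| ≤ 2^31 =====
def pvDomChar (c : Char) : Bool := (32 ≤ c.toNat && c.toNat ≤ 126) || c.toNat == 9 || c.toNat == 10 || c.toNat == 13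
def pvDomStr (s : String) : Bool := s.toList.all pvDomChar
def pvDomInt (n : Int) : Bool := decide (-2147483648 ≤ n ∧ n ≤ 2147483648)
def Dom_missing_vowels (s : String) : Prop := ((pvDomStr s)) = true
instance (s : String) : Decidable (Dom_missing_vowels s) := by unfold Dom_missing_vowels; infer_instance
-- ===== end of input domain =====

-- B replaces A's found-set accumulation + set difference + sort with five ordered membership probes into s (idiomatic, no set, no sort).

-- ===== PORT A =====
def missing_vowels (s : String) : String :=
  let vowels : PySem.Set Char := PySem.Set.ofList ['a', 'e', 'i', 'o', 'u']
  let found_vowels : PySem.Set Char :=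
    s.toList.foldl (fun fv ch => if vowels.contains ch then fv.add ch else fv) PySem.Set.empty
  let missing : PySem.Set Char := PySem.Set.diff vowels found_vowels
  if missing.isEmpty then "None"
  else String.mk (PySem.List.sorted missing (fun c => c) false)

-- ===== PORT B =====
def missing_vowels_alt (s : String) : String :=
  let res : List Char := "aeiou".toList.filter (fun v => !(s.toList.contains v))
  if res.isEmpty then "None" else String.mk res

-- ===== PRECONDITION & SPEC =====
def Spec_missing_vowels (s : String) (out : String) : Prop := out = missing_vowels_alt s
instance (s : String) (out : String) : Decidable (Spec_missing_vowels s out) := by unfold Spec_missing_vowels; infer_instance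

-- ===== CLAIM (what is proved, stated in full; the proofs are below) =====
def Claim_equal_missing_vowels : Prop := ∀ (s : String), Dom_missing_vowels s → Spec_missing_vowels s (missing_vowels s)

-- ===== LEMMAS AND PROOFS =====

-- membership in A's accumulated found-vowels set
theorem mem_found (vs : List Char) (l : List Char) (acc : PySem.Set Char) (c : Char) :
    c ∈ l.foldl (fun fv ch => if (PySem.Set.ofList vs).contains ch then fv.add ch else fv) acc ↔
      c ∈ acc ∨ (c ∈ l ∧ c ∈ vs) := by
  induction l generalizing acc with
  | nil => simp
  | cons x xs ih =>
    have hx : (PySem.Set.ofList vs).contains x = true ↔ x ∈ vs := by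
      rw [PySem.Set.contains_iff, PySem.Set.mem_ofList]
    by_cases h : x ∈ vs
    · rw [List.foldl_cons, if_pos (hx.mpr h), ih, PySem.Set.mem_add, List.mem_cons]
      constructor
      · rintro ((hc | rfl) | ⟨h1, h2⟩)
        · exact Or.inl hc
        · exact Or.inr ⟨Or.inl rfl, h⟩
        · exact Or.inr ⟨Or.inr h1, h2⟩
      · rintro (hc | ⟨(rfl | h1), h2⟩)
        · exact Or.inl (Or.inl hc)
        · exact Or.inl (Or.inr rfl)
        · exact Or.inr ⟨h1, h2⟩
    · rw [List.foldl_cons, if_neg (fun hh => h (hx.mp hh)), ih, List.mem_cons]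
      constructor
      · rintro (hc | ⟨h1, h2⟩)
        · exact Or.inl hc
        · exact Or.inr ⟨Or.inr h1, h2⟩
      · rintro (hc | ⟨(rfl | h1), h2⟩)
        · exact Or.inl hc
        · exact absurd h2 h
        · exact Or.inr ⟨h1, h2⟩

-- ===== VERDICT (by name: the statement is the Claim_ definition above) =====
theorem missing_vowels_spec : Claim_equal_missing_vowels := by
  unfold Claim_equal_missing_vowels
  intro s _
  unfold Spec_missing_vowels missing_vowels missing_vowels_alt
  simp only []
  set V : List Char := ['a','e','i','o','u'] with hV
  set found := s.toList.foldl (fun fv ch => if (PySem.Set.ofList V).contains ch then fv.add ch else fv) PySem.Set.empty with hfound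
  set missing := PySem.Set.diff (PySem.Set.ofList V) found with hmiss
  set res := "aeiou".toList.filter (fun v => !(s.toList.contains v)) with hres
  have htl : "aeiou".toList = V := by decide
  have hmemf : ∀ c, c ∈ found ↔ c ∈ s.toList ∧ c ∈ V := by
    intro c
    rw [hfound, mem_found]
    simp [PySem.Set.empty]
  have hmemm : ∀ c, c ∈ missing ↔ c ∈ V ∧ c ∉ s.toList := by
    intro c
    rw [hmiss, PySem.Set.mem_diff, PySem.Set.mem_ofList, hmemf]
    tauto
  have hmemr : ∀ c, c ∈ res ↔ c ∈ V ∧ c ∉ s.toList := by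
    intro c
    rw [hres, List.mem_filter, htl]
    simp
  have hndm : missing.Nodup := PySem.Set.nodup_diff _ _ (PySem.Set.nodup_ofList V)
  have hndr : res.Nodup := by
    rw [hres]
    exact List.Nodup.filter _ (by decide)
  have hperm : res.Perm missing := by
    rw [List.perm_ext_iff_of_nodup hndr hndm]
    intro a; rw [hmemr, hmemm]
  have hpw : res.Pairwise (fun a b : Char => a < b) := by
    rw [hres]
    exact List.Pairwise.sublist (List.filter_sublist) (by decide)
  have hsorted : PySem.List.sorted missing (fun c => c) false = res :=
    PySem.List.sorted_eq_of_perm_of_pairwise_lt _ _ _ hperm hpw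
  have hlen : missing.length = res.length := (hperm.length_eq).symm
  by_cases hm : missing.isEmpty
  · have hr : res.isEmpty := by
      rw [List.isEmpty_iff_length_eq_zero] at hm ⊢
      omega
    rw [if_pos hm, if_pos hr]
  · have hr : ¬ res.isEmpty := by
      rw [List.isEmpty_iff_length_eq_zero] at hm ⊢
      omega
    rw [if_neg hm, if_neg hr, hsorted]
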